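-- pv_equiv track=rewrite | github.com/michaelliudl/CodingInterviewPython | Meta/prep_hub/general_eng/L16_Heaps/01_largest_triple_products.py | findMaxProductBackward
-- ===== SOURCE A (Python) =====
-- import heapq
--
-- def findMaxProductBackward(arr):
--   # Write your code here
--   if not arr:
--     return arr
--   result = [-1] * len(arr)
--   heap = []
--   for index, num in enumerate(arr):
--     heapq.heappush(heap, (-num, index))
--   for i in range(len(arr) - 1, 1, -1):
--     prod = 1
--     temp = [None] * 3
--     for j in range(3):
--       while heap:
--         value, index = heapq.heappop(heap)
--         if index > i:
--             continue
--         else: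
--             prod *= -value
--             temp[j] = (value, index)
--             break
--     result[i] = prod
--     for value, index in temp:
--       if index < i:
--         heapq.heappush(heap, (value, index))
--   return result
-- ===== SOURCE B (Python) =====
-- def findMaxProductBackward(arr):
--   # Forward single pass keeping the three largest values of the prefix (sorted ascending).
--   result = []
--   top = []  # at most 3 largest values of the prefix so far, ascending
--   for i, x in enumerate(arr):
--     if len(top) < 3:
--       top.append(x)
--       top.sort()
--     elif x > top[0]:
--       top[0] = x
--       top.sort()
--     result.append(top[0] * top[1] * top[2] if i >= 2 else -1)
--   return result
-- ===== Notes on version B (the rewrite author's own statement) =====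
-- stated objective: faster
-- what changed: A builds a lazily-deleted max-heap of all (value, index) pairs and sweeps indices backward, popping/reinserting the top three at every position; B does one forward pass keeping only the three largest values of the prefix in a sorted 3-element list.
import Mathlib
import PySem

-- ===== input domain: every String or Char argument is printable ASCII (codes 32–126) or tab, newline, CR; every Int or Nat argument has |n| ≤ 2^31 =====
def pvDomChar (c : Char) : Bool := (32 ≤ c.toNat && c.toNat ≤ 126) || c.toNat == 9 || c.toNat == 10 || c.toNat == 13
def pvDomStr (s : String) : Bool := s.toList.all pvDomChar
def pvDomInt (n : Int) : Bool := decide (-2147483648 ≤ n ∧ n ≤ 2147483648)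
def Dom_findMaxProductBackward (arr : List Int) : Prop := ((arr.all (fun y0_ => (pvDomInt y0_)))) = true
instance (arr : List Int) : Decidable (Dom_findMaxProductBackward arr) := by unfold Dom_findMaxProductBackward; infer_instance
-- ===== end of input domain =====

-- B replaces A's backward sweep over a lazily-deleted max-heap by one forward pass that keeps
-- the three largest prefix values; equal return values proved for all inputs (both are total).

-- ===== PORT A =====
-- heapq with (−num, index) keys is modelled exactly as a priority queue: a list kept sorted
-- ascending by the lexicographic order on (Int × Nat); push = ordered insert, pop = head.
def pqPush : List (Int × Nat) → (Int × Nat) → List (Int × Nat)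
  | [], p => [p]
  | q :: t, p =>
    if p.1 < q.1 ∨ (p.1 = q.1 ∧ p.2 ≤ q.2) then p :: q :: t else q :: pqPush t p

-- the Python `while heap: … if index > i: continue else: break` block: pop entries, discarding
-- stale ones (index > i), until one with index ≤ i is found (or the heap runs out)
def pqPopLE : List (Int × Nat) → Nat → Option (Int × Nat) × List (Int × Nat)
  | [], _ => (none, [])
  | q :: t, i => if i < q.2 then pqPopLE t i else (some q, t)

-- `for index, num in enumerate(arr): heapq.heappush(heap, (-num, index))`
def buildHeap : List Int → Nat → List (Int × Nat) → List (Int × Nat)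
  | [], _, h => h
  | x :: t, k, h => buildHeap t (k + 1) (pqPush h (-x, k))

-- one iteration of `for j in range(3)`: state (prod, temp, heap)
def pickStep (i : Nat) (st : Int × List (Option (Int × Nat)) × List (Int × Nat)) :
    Int × List (Option (Int × Nat)) × List (Int × Nat) :=
  match pqPopLE st.2.2 i with
  | (some e, h') => (st.1 * (-e.1), st.2.1 ++ [some e], h')
  | (none, h') => (st.1, st.2.1 ++ [none], h')

def pick3 (h : List (Int × Nat)) (i : Nat) : Int × List (Option (Int × Nat)) × List (Int × Nat) :=
  (List.range 3).foldl (fun st _ => pickStep i st) (1, [], h)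

-- `for value, index in temp: if index < i: heappush(...)`.  A `none` entry would be a Python
-- TypeError; it is unreachable for i ≥ 2 (the heap then always holds ≥ 3 entries with index ≤ i).
def pushTemp (i : Nat) (temp : List (Option (Int × Nat))) (h : List (Int × Nat)) :
    List (Int × Nat) :=
  temp.foldl (fun h o => match o with
    | some e => if e.2 < i then pqPush h e else h
    | none => h) h

-- `for i in range(len(arr) - 1, 1, -1)`, counting the index down; stops below 2
def loopA : Nat → List Int → List (Int × Nat) → List Int
  | 0, res, _ => res
  | 1, res, _ => res
  | i + 2, res, h =>
    let st := pick3 h (i + 2)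
    loopA (i + 1) (res.set (i + 2) st.1) (pushTemp (i + 2) st.2.1 st.2.2)

def findMaxProductBackward (arr : List Int) : List Int :=
  if arr = [] then arr
  else loopA (arr.length - 1) (List.replicate arr.length (-1)) (buildHeap arr 0 [])

-- ===== PORT B =====
-- `top` holds (ascending) the at most three largest values of the prefix seen so far
def topInsert (top : List Int) (x : Int) : List Int :=
  if top.length < 3 then PySem.List.sorted (top ++ [x]) (fun v => v) false
  else if top.headD 0 < x then PySem.List.sorted (top.set 0 x) (fun v => v) false
  else top

-- the getD defaults are unreachable: top has exactly 3 elements whenever 2 ≤ i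
def loopB : List Int → Nat → List Int → List Int → List Int
  | [], _, _, res => res
  | x :: t, i, top, res =>
    let top' := topInsert top x
    let v := if 2 ≤ i then top'.headD 0 * top'.getD 1 0 * top'.getD 2 0 else -1
    loopB t (i + 1) top' (res ++ [v])

def findMaxProductBackward_alt (arr : List Int) : List Int := loopB arr 0 [] []

-- ===== PRECONDITION & SPEC =====
def Spec_findMaxProductBackward (arr : List Int) (out : List Int) : Prop := out = findMaxProductBackward_alt arr
instance (arr : List Int) (out : List Int) : Decidable (Spec_findMaxProductBackward arr out) := by unfold Spec_findMaxProductBackward; infer_instance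

-- ===== CLAIM (what is proved, stated in full; the proofs are below) =====
def Claim_equal_findMaxProductBackward : Prop := ∀ (arr : List Int), Dom_findMaxProductBackward arr → Spec_findMaxProductBackward arr (findMaxProductBackward arr)

-- ===== LEMMAS AND PROOFS =====

-- the common specification: entry j (for j ≥ 2) is the product of the three largest
-- values of arr[0..j], i.e. of the last three of the ascending sort of that prefix
def sortI (l : List Int) : List Int := PySem.List.sorted l (fun v => v) false
def tl3 (l : List Int) : List Int := l.drop (l.length - 3)
def prodAt (arr : List Int) (m : Nat) : Int := (tl3 (sortI (arr.take m))).prod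
def outF (arr : List Int) (j : Nat) : Int := if 2 ≤ j then prodAt arr (j + 1) else -1
def finalRes (arr : List Int) : List Int := (List.range arr.length).map (outF arr)

-- == generic facts about the pair order used by the heap ==
def lep (p q : Int × Nat) : Prop := p.1 < q.1 ∨ (p.1 = q.1 ∧ p.2 ≤ q.2)

lemma lep_total (p q : Int × Nat) : lep p q ∨ lep q p := by unfold lep; omega

lemma lep_trans {p q r : Int × Nat} (h1 : lep p q) (h2 : lep q r) : lep p r := by
  unfold lep at *; omega

lemma pqPush_perm (h : List (Int × Nat)) (p : Int × Nat) : (pqPush h p).Perm (p :: h) := by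
  induction h with
  | nil => simp [pqPush]
  | cons q t ih =>
    by_cases hc : p.1 < q.1 ∨ (p.1 = q.1 ∧ p.2 ≤ q.2)
    · simp [pqPush, hc]
    · simp only [pqPush, if_neg hc]
      exact (ih.cons q).trans (List.Perm.swap p q t)

lemma pqPush_pairwise {h : List (Int × Nat)} (p : Int × Nat)
    (hp : h.Pairwise lep) : (pqPush h p).Pairwise lep := by
  induction h with
  | nil => simp [pqPush, List.Pairwise]
  | cons q t ih =>
    rcases List.pairwise_cons.mp hp with ⟨hq, ht⟩
    by_cases hc : p.1 < q.1 ∨ (p.1 = q.1 ∧ p.2 ≤ q.2)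
    · simp only [pqPush, if_pos hc]
      refine List.pairwise_cons.mpr ⟨?_, hp⟩
      intro y hy
      rcases List.mem_cons.mp hy with rfl | hyt
      · exact hc
      · exact lep_trans hc (hq y hyt)
    · simp only [pqPush, if_neg hc]
      refine List.pairwise_cons.mpr ⟨?_, ih ht⟩
      intro y hy
      have : y = p ∨ y ∈ t := by
        have := (pqPush_perm t p).mem_iff.mp hy
        simpa using this
      rcases this with rfl | hyt
      · exact (lep_total y q).resolve_left hc
      · exact hq y hyt

-- == pqPopLE: head / tail / pairwise of the (index ≤ i)-filtered heap ==
lemma pqPopLE_fst (h : List (Int × Nat)) (i : Nat) :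
    (pqPopLE h i).1 = (h.filter (fun p => p.2 ≤ i)).head? := by
  induction h with
  | nil => simp [pqPopLE]
  | cons q t ih =>
    by_cases hc : i < q.2
    · have : ¬ (q.2 ≤ i) := by omega
      simp [pqPopLE, hc, ih, List.filter_cons, this]
    · have : q.2 ≤ i := by omega
      simp [pqPopLE, hc, List.filter_cons, this]

lemma pqPopLE_snd_filter (h : List (Int × Nat)) (i : Nat) :
    (pqPopLE h i).2.filter (fun p => p.2 ≤ i) = (h.filter (fun p => p.2 ≤ i)).tail := by
  induction h with
  | nil => simp [pqPopLE]
  | cons q t ih =>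
    by_cases hc : i < q.2
    · have : ¬ (q.2 ≤ i) := by omega
      simp [pqPopLE, hc, ih, List.filter_cons, this]
    · have : q.2 ≤ i := by omega
      simp [pqPopLE, hc, List.filter_cons, this]

lemma pqPopLE_sublist (h : List (Int × Nat)) (i : Nat) : (pqPopLE h i).2.Sublist h := by
  induction h with
  | nil => simp [pqPopLE]
  | cons q t ih =>
    by_cases hc : i < q.2
    · simp only [pqPopLE, if_pos hc]
      exact ih.trans (List.sublist_cons_self q t)
    · simp only [pqPopLE, if_neg hc]
      exact List.sublist_cons_self q t

-- == buildHeap ==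
def pairsFrom : List Int → Nat → List (Int × Nat)
  | [], _ => []
  | x :: t, k => (-x, k) :: pairsFrom t (k + 1)

lemma buildHeap_perm (l : List Int) : ∀ (k : Nat) (h : List (Int × Nat)),
    (buildHeap l k h).Perm (h ++ pairsFrom l k) := by
  induction l with
  | nil => intro k h; simp [buildHeap, pairsFrom]
  | cons x t ih =>
    intro k h
    have h1 := ih (k + 1) (pqPush h (-x, k))
    refine h1.trans ?_
    have h2 : (pqPush h (-x, k) ++ pairsFrom t (k + 1)).Perm
        (((-x, k) :: h) ++ pairsFrom t (k + 1)) := (pqPush_perm h _).append_right _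
    refine h2.trans ?_
    show ((-x, k) :: (h ++ pairsFrom t (k + 1))).Perm (h ++ ((-x, k) :: pairsFrom t (k + 1)))
    exact (List.perm_middle (a := (-x, k)) (l₁ := h) (l₂ := pairsFrom t (k + 1))).symm

lemma buildHeap_pairwise (l : List Int) : ∀ (k : Nat) (h : List (Int × Nat)),
    h.Pairwise lep → (buildHeap l k h).Pairwise lep := by
  induction l with
  | nil => intro k h hp; simpa [buildHeap] using hp
  | cons x t ih => intro k h hp; exact ih (k + 1) _ (pqPush_pairwise _ hp)

lemma pairsFrom_eq (l : List Int) : ∀ k : Nat,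
    pairsFrom l k = (List.range l.length).map (fun j => (-(l.getD j 0), k + j)) := by
  induction l with
  | nil => intro k; simp [pairsFrom]
  | cons x t ih =>
    intro k
    show pairsFrom (x :: t) k = List.map _ (List.range (t.length + 1))
    rw [List.range_succ_eq_map, List.map_cons, List.map_map]
    show pairsFrom (x :: t) k = (-x, k + 0) :: _
    rw [pairsFrom, ih (k + 1)]
    congr 1
    apply List.map_congr_left
    intro j hj
    simp only [Function.comp_apply, List.getD_cons_succ, Prod.mk.injEq]
    exact ⟨trivial, by omega⟩

def pairsLe (arr : List Int) (i : Nat) : List (Int × Nat) :=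
  (List.range (i + 1)).map (fun k => (-(arr.getD k 0), k))

lemma take_eq_range_map (l : List Int) (m : Nat) (hm : m ≤ l.length) :
    (List.range m).map (fun k => l.getD k 0) = l.take m := by
  apply List.ext_getElem
  · simp [hm]
  · intro n h1 h2
    simp only [List.getElem_map, List.getElem_range, List.getElem_take]
    rw [List.getD_eq_getElem]

-- == ordered insert (proof-side only) and the canonical sorted list ==
def oi (x : Int) : List Int → List Int
  | [] => [x]
  | y :: t => if x ≤ y then x :: y :: t else y :: oi x t

lemma oi_perm (x : Int) (l : List Int) : (oi x l).Perm (x :: l) := by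
  induction l with
  | nil => simp [oi]
  | cons y t ih =>
    by_cases hc : x ≤ y
    · simp [oi, hc]
    · simp only [oi, if_neg hc]
      exact (ih.cons y).trans (List.Perm.swap x y t)

lemma oi_pairwise {l : List Int} (x : Int) (hp : l.Pairwise (· ≤ ·)) :
    (oi x l).Pairwise (· ≤ ·) := by
  induction l with
  | nil => simp [oi]
  | cons y t ih =>
    rcases List.pairwise_cons.mp hp with ⟨hy, ht⟩
    by_cases hc : x ≤ y
    · simp only [oi, if_pos hc]
      refine List.pairwise_cons.mpr ⟨?_, hp⟩
      intro z hz
      rcases List.mem_cons.mp hz with rfl | hzt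
      · exact hc
      · exact hc.trans (hy z hzt)
    · simp only [oi, if_neg hc]
      refine List.pairwise_cons.mpr ⟨?_, ih ht⟩
      intro z hz
      have : z = x ∨ z ∈ t := by simpa using (oi_perm x t).mem_iff.mp hz
      rcases this with rfl | hzt
      · omega
      · exact hy z hzt

lemma oi_append_left {x : Int} {l₁ : List Int} (l₂ : List Int)
    (hl : ∀ y ∈ l₁, ¬ x ≤ y) : oi x (l₁ ++ l₂) = l₁ ++ oi x l₂ := by
  induction l₁ with
  | nil => simp
  | cons y t ih =>
    have hy : ¬ x ≤ y := hl y (by simp)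
    simp only [List.cons_append, oi, if_neg hy]
    rw [ih (fun z hz => hl z (by simp [hz]))]

lemma oi_exists (x : Int) (l : List Int) :
    ∃ l₁ l₂, l = l₁ ++ l₂ ∧ oi x l = l₁ ++ x :: l₂ ∧ ∀ y ∈ l₁, ¬ x ≤ y := by
  induction l with
  | nil => exact ⟨[], [], by simp [oi]⟩
  | cons y t ih =>
    by_cases hc : x ≤ y
    · exact ⟨[], y :: t, by simp [oi, hc]⟩
    · rcases ih with ⟨l₁, l₂, h1, h2, h3⟩
      refine ⟨y :: l₁, l₂, by simp [h1], ?_, ?_⟩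
      · simp [oi, hc, h2]
      · intro z hz
        rcases List.mem_cons.mp hz with rfl | hz
        · exact hc
        · exact h3 z hz

lemma sortI_pairwise (l : List Int) : (sortI l).Pairwise (· ≤ ·) := by
  have := PySem.List.sorted_pairwise l (fun v => v)
  simpa [sortI] using this

lemma sortI_perm (l : List Int) : (sortI l).Perm l := PySem.List.sorted_perm l _ _

lemma sortI_canon {l ys : List Int} (hp : ys.Perm l) (hs : ys.Pairwise (· ≤ ·)) :
    sortI l = ys := PySem.List.sorted_id_eq_of_perm_of_pairwise l ys hp hs

lemma sortI_append_singleton (P : List Int) (x : Int) :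
    sortI (P ++ [x]) = oi x (sortI P) := by
  apply sortI_canon
  · refine ((oi_perm x _).trans ((sortI_perm P).cons x)).trans ?_
    simpa using (List.perm_middle (a := x) (l₁ := P) (l₂ := ([] : List Int))).symm
  · exact oi_pairwise x (sortI_pairwise P)

-- == the two central step lemmas ==
lemma len_oi (x : Int) (l : List Int) : (oi x l).length = l.length + 1 := by
  simpa using (oi_perm x l).length_eq

lemma list_len3 (l : List Int) (h : l.length = 3) : ∃ a b c, l = [a, b, c] := by
  match l, h with | [a, b, c], _ => exact ⟨a, b, c, rfl⟩

lemma topInsert_spec {S : List Int} (x : Int) (hp : S.Pairwise (· ≤ ·)) :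
    topInsert (tl3 S) x = tl3 (oi x S) := by
  by_cases hlen : S.length < 3
  · have h0 : S.length - 3 = 0 := by omega
    have hS : tl3 S = S := by simp [tl3, h0]
    have h0' : (oi x S).length - 3 = 0 := by rw [len_oi]; omega
    have h1 : tl3 (oi x S) = oi x S := by simp [tl3, h0']
    rw [hS, h1, topInsert, if_pos (by omega)]
    apply sortI_canon (l := S ++ [x])
    · refine (oi_perm x S).trans ?_
      simpa using (List.perm_middle (a := x) (l₁ := S) (l₂ := ([] : List Int))).symm
    · exact oi_pairwise x hp
  · push_neg at hlen
    have hdec : S = S.take (S.length - 3) ++ tl3 S := (List.take_append_drop _ S).symm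
    set D := S.take (S.length - 3) with hD
    have hDlen : D.length = S.length - 3 := by
      simp [hD, List.length_take]
    have hTlen : (tl3 S).length = 3 := by
      simp only [tl3, List.length_drop]
      omega
    obtain ⟨a, b, c, hT⟩ := list_len3 _ hTlen
    have hSdec : S = D ++ [a, b, c] := by rw [← hT]; exact hdec
    have hpw := hp
    rw [hSdec] at hpw
    rcases List.pairwise_append.mp hpw with ⟨hpD, hpT, hcross⟩
    have hab : a ≤ b := by
      rcases List.pairwise_cons.mp hpT with ⟨h1, _⟩
      exact h1 b (by simp)
    have hbc : b ≤ c := by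
      rcases List.pairwise_cons.mp hpT with ⟨_, h2⟩
      rcases List.pairwise_cons.mp h2 with ⟨h3, _⟩
      exact h3 c (by simp)
    have hDa : ∀ y ∈ D, y ≤ a := fun y hy => hcross y hy a (by simp)
    rw [hT, topInsert, if_neg (by simp)]
    by_cases hax : ([a, b, c] : List Int).headD 0 < x
    · rw [if_pos hax]
      simp only [List.headD_cons] at hax
      have hset : ([a, b, c] : List Int).set 0 x = [x, b, c] := rfl
      have hsorted : PySem.List.sorted ([x, b, c] : List Int) (fun v => v) false = oi x [b, c] := by
        apply sortI_canon (l := [x, b, c])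
        · exact oi_perm x [b, c]
        · exact oi_pairwise x (by simp [hbc])
      have hSdec' : S = (D ++ [a]) ++ [b, c] := by rw [hSdec]; simp
      have hoiS : oi x S = (D ++ [a]) ++ oi x [b, c] := by
        rw [hSdec']
        apply oi_append_left
        intro y hy
        rcases List.mem_append.mp hy with hyD | hya
        · have := hDa y hyD; omega
        · simp at hya; omega
      have hlen2 : (oi x S).length - 3 = (D ++ [a]).length := by
        rw [len_oi, hSdec']
        simp [len_oi]
      rw [hset, hsorted]
      symm
      simp only [tl3]
      rw [hlen2, hoiS, List.drop_left]
    · rw [if_neg hax]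
      simp only [List.headD_cons] at hax
      obtain ⟨l₁, l₂, hS12, hoi, hneg⟩ := oi_exists x S
      have hl1 : l₁.length ≤ D.length := by
        by_contra hgt
        push_neg at hgt
        have hidx : D.length < S.length := by rw [hSdec]; simp
        have ha' : S[D.length]'hidx = a := by
          rw [List.getElem_of_eq hSdec]
          rw [List.getElem_append_right (le_refl D.length)]
          simp
        have hl1S : l₁ = S.take l₁.length := by rw [hS12, List.take_left]
        have hmem : a ∈ l₁ := by
          rw [hl1S, List.mem_take_iff_getElem]
          exact ⟨D.length, by omega, ha'⟩
        have := hneg a hmem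
        omega
      have hl2 : l₂ = S.drop l₁.length := by rw [hS12, List.drop_left]
      have hoilen : (oi x S).length - 3 = D.length + 1 := by
        rw [len_oi, hSdec]; simp
      have hdropS : S.drop D.length = [a, b, c] := by rw [hSdec, List.drop_left]
      symm
      simp only [tl3]
      rw [hoilen, hoi]
      have hsplit : l₁ ++ x :: l₂ = (l₁ ++ [x]) ++ l₂ := by simp
      rw [hsplit, List.drop_append]
      have h1 : (D.length + 1) - (l₁ ++ [x]).length = D.length - l₁.length := by
        simp
      have h2 : (l₁ ++ [x]).drop (D.length + 1) = [] := by
        apply List.drop_eq_nil_of_le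
        simp
        omega
      rw [h1, h2, hl2, List.drop_drop]
      have h3 : l₁.length + (D.length - l₁.length) = D.length := by omega
      rw [h3, hdropS]
      simp

lemma take_succ_getElem (arr : List Int) (m : Nat) (hm : m < arr.length) :
    arr.take (m + 1) = arr.take m ++ [arr[m]] := by
  rw [List.take_succ]
  simp [List.getElem?_eq_getElem hm]

lemma tl3_len3 (l : List Int) (hl : 3 ≤ l.length) : (tl3 l).length = 3 := by
  simp only [tl3, List.length_drop]
  omega

lemma loopB_inv (arr : List Int) : ∀ k m : Nat, m ≤ arr.length → arr.length - m = k →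
    loopB (arr.drop m) m (tl3 (sortI (arr.take m))) ((List.range m).map (outF arr)) =
      finalRes arr := by
  intro k
  induction k with
  | zero =>
    intro m hm hk
    have hm' : m = arr.length := by omega
    subst hm'
    rw [List.drop_length, loopB, finalRes]
  | succ k ih =>
    intro m hm hk
    have hlt : m < arr.length := by omega
    rw [List.drop_eq_getElem_cons hlt, loopB]
    have htop : topInsert (tl3 (sortI (arr.take m))) arr[m] =
        tl3 (sortI (arr.take (m + 1))) := by
      rw [topInsert_spec arr[m] (sortI_pairwise _), take_succ_getElem arr m hlt,
        sortI_append_singleton]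
    rw [htop]
    have hv : (if 2 ≤ m then (tl3 (sortI (arr.take (m + 1)))).headD 0 *
          (tl3 (sortI (arr.take (m + 1)))).getD 1 0 *
          (tl3 (sortI (arr.take (m + 1)))).getD 2 0 else -1) = outF arr m := by
      unfold outF
      by_cases h2 : 2 ≤ m
      · rw [if_pos h2, if_pos h2]
        have hlen : (sortI (arr.take (m + 1))).length = m + 1 := by
          rw [(sortI_perm _).length_eq, List.length_take]
          omega
        obtain ⟨p, q, r, hpqr⟩ := list_len3 _ (tl3_len3 (sortI (arr.take (m + 1))) (by rw [hlen]; omega))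
        rw [prodAt, hpqr]
        simp [List.prod_cons]
        ring
      · rw [if_neg h2, if_neg h2]
    rw [hv]
    have hres : (List.range m).map (outF arr) ++ [outF arr m] =
        (List.range (m + 1)).map (outF arr) := by
      rw [List.range_succ]
      simp
    rw [hres]
    exact ih (m + 1) (by omega) (by omega)

lemma alt_eq_finalRes (arr : List Int) : findMaxProductBackward_alt arr = finalRes arr := by
  have h := loopB_inv arr arr.length 0 (Nat.zero_le _) (by omega)
  simpa [findMaxProductBackward_alt, sortI, tl3] using h

-- == A-side ==
lemma lep_fst {p q : Int × Nat} (h : lep p q) : p.1 ≤ q.1 := by unfold lep at h; omega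

lemma pushTemp_pairwise (i : Nat) : ∀ (temp : List (Option (Int × Nat))) (h : List (Int × Nat)),
    h.Pairwise lep → (pushTemp i temp h).Pairwise lep := by
  intro temp
  induction temp with
  | nil => intro h hp; exact hp
  | cons o t ih =>
    intro h hp
    match o with
    | none => exact ih h hp
    | some e =>
      show (pushTemp i t (if e.2 < i then pqPush h e else h)).Pairwise lep
      by_cases hc : e.2 < i
      · rw [if_pos hc]; exact ih _ (pqPush_pairwise e hp)
      · rw [if_neg hc]; exact ih h hp

lemma pushTemp_perm (i : Nat) : ∀ (es : List (Int × Nat)) (h : List (Int × Nat)),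
    (pushTemp i (es.map some) h).Perm ((es.filter (fun e => e.2 < i)) ++ h) := by
  intro es
  induction es with
  | nil => intro h; simp [pushTemp]
  | cons e t ih =>
    intro h
    show (pushTemp i (t.map some) (if e.2 < i then pqPush h e else h)).Perm _
    by_cases hc : e.2 < i
    · rw [if_pos hc]
      refine (ih (pqPush h e)).trans ?_
      have h1 : (pqPush h e).Perm (e :: h) := pqPush_perm h e
      refine (h1.append_left _).trans ?_
      have : ((e :: t) : List (Int × Nat)).filter (fun e => e.2 < i) =
          e :: t.filter (fun e => e.2 < i) := by
        simp [List.filter_cons, hc]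
      rw [this]
      exact List.perm_middle
    · rw [if_neg hc]
      refine (ih h).trans ?_
      have : ((e :: t) : List (Int × Nat)).filter (fun e => e.2 < i) =
          t.filter (fun e => e.2 < i) := by
        simp [List.filter_cons, hc]
      rw [this]

lemma list_ge3 (l : List (Int × Nat)) (h : 3 ≤ l.length) :
    ∃ a b c t, l = a :: b :: c :: t := by
  rcases l with _ | ⟨a, _ | ⟨b, _ | ⟨c, t⟩⟩⟩ <;> simp at h
  exact ⟨a, b, c, t, rfl⟩

lemma filter_lt_le (i : Nat) (hi : 1 ≤ i) (l : List (Int × Nat)) :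
    (l.filter (fun e => e.2 < i)).filter (fun p => p.2 ≤ i - 1) = l.filter (fun p => p.2 ≤ i - 1) := by
  rw [List.filter_filter]
  apply List.filter_congr
  intro x _
  by_cases hx : x.2 ≤ i - 1
  · have : x.2 < i := by omega
    simp [hx, this]
  · simp [hx]

lemma filter_le_of_le (i : Nat) (hi : 1 ≤ i) (l : List (Int × Nat)) :
    (l.filter (fun p => p.2 ≤ i)).filter (fun p => p.2 ≤ i - 1) = l.filter (fun p => p.2 ≤ i - 1) := by
  rw [List.filter_filter]
  apply List.filter_congr
  intro x _
  by_cases hx : x.2 ≤ i - 1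
  · have : x.2 ≤ i := by omega
    simp [hx, this]
  · simp [hx]

lemma pairsLe_filter (arr : List Int) (i : Nat) (hi : 1 ≤ i) :
    (pairsLe arr i).filter (fun p => p.2 ≤ i - 1) = pairsLe arr (i - 1) := by
  have hi1 : i - 1 + 1 = i := by omega
  simp only [pairsLe, hi1]
  rw [List.range_succ, List.map_append, List.filter_append]
  have h1 : ((List.range i).map (fun k => ((-(arr.getD k 0), k) : Int × Nat))).filter
      (fun p => p.2 ≤ i - 1) = (List.range i).map (fun k => (-(arr.getD k 0), k)) := by
    apply List.filter_eq_self.mpr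
    intro a ha
    simp only [List.mem_map, List.mem_range] at ha
    obtain ⟨k, hk, rfl⟩ := ha
    simp
    omega
  have h2 : (([i] : List Nat).map (fun k => ((-(arr.getD k 0), k) : Int × Nat))).filter
      (fun p => p.2 ≤ i - 1) = [] := by
    rw [List.filter_eq_nil_iff]
    intro a ha
    simp only [List.map_cons, List.map_nil, List.mem_singleton] at ha
    subst ha
    simp
    omega
  rw [h1, h2, List.append_nil]

lemma pick3_spec (arr : List Int) (i : Nat) (h : List (Int × Nat))
    (h2i : 2 ≤ i) (hin : i < arr.length)
    (hp : h.Pairwise lep)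
    (hperm : (h.filter (fun p => p.2 ≤ i)).Perm (pairsLe arr i)) :
    (pick3 h i).1 = prodAt arr (i + 1) ∧
    (pushTemp i (pick3 h i).2.1 (pick3 h i).2.2).Pairwise lep ∧
    ((pushTemp i (pick3 h i).2.1 (pick3 h i).2.2).filter
        (fun p => p.2 ≤ i - 1)).Perm (pairsLe arr (i - 1)) := by
  have hFpw : (h.filter (fun p => p.2 ≤ i)).Pairwise lep := hp.filter _
  have hFlen : (h.filter (fun p => p.2 ≤ i)).length = i + 1 := by
    rw [hperm.length_eq]
    simp [pairsLe]
  obtain ⟨e1, e2, e3, rest, hFeq⟩ := list_ge3 _ (by omega : 3 ≤ (h.filter (fun p => p.2 ≤ i)).length)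
  -- first pop
  have hpop1 : pqPopLE h i = (some e1, (pqPopLE h i).2) := by
    have h1 := pqPopLE_fst h i
    rw [hFeq] at h1
    rw [show pqPopLE h i = ((pqPopLE h i).1, (pqPopLE h i).2) from rfl, h1]
    rfl
  have hApw : (pqPopLE h i).2.Pairwise lep := List.Pairwise.sublist (pqPopLE_sublist h i) hp
  have hAfil : (pqPopLE h i).2.filter (fun p => p.2 ≤ i) = e2 :: e3 :: rest := by
    rw [pqPopLE_snd_filter, hFeq]
    rfl
  -- second pop
  have hpop2 : pqPopLE (pqPopLE h i).2 i = (some e2, (pqPopLE (pqPopLE h i).2 i).2) := by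
    have h1 := pqPopLE_fst (pqPopLE h i).2 i
    rw [hAfil] at h1
    rw [show pqPopLE (pqPopLE h i).2 i = ((pqPopLE (pqPopLE h i).2 i).1, (pqPopLE (pqPopLE h i).2 i).2) from rfl, h1]
    rfl
  have hBpw : (pqPopLE (pqPopLE h i).2 i).2.Pairwise lep :=
    List.Pairwise.sublist (pqPopLE_sublist _ i) hApw
  have hBfil : (pqPopLE (pqPopLE h i).2 i).2.filter (fun p => p.2 ≤ i) = e3 :: rest := by
    rw [pqPopLE_snd_filter, hAfil]
    rfl
  -- third pop
  have hpop3 : pqPopLE (pqPopLE (pqPopLE h i).2 i).2 i =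
      (some e3, (pqPopLE (pqPopLE (pqPopLE h i).2 i).2 i).2) := by
    have h1 := pqPopLE_fst (pqPopLE (pqPopLE h i).2 i).2 i
    rw [hBfil] at h1
    rw [show pqPopLE (pqPopLE (pqPopLE h i).2 i).2 i =
      ((pqPopLE (pqPopLE (pqPopLE h i).2 i).2 i).1, (pqPopLE (pqPopLE (pqPopLE h i).2 i).2 i).2) from rfl, h1]
    rfl
  have hCpw : (pqPopLE (pqPopLE (pqPopLE h i).2 i).2 i).2.Pairwise lep :=
    List.Pairwise.sublist (pqPopLE_sublist _ i) hBpw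
  have hCfil : (pqPopLE (pqPopLE (pqPopLE h i).2 i).2 i).2.filter (fun p => p.2 ≤ i) = rest := by
    rw [pqPopLE_snd_filter, hBfil]
    rfl
  -- evaluate pick3
  have hpick : pick3 h i =
      (((1 * -e1.1) * -e2.1) * -e3.1, [some e1, some e2, some e3],
        (pqPopLE (pqPopLE (pqPopLE h i).2 i).2 i).2) := by
    show pickStep i (pickStep i (pickStep i (1, [], h))) = _
    have s1 : pickStep i (1, [], h) = (1 * -e1.1, [some e1], (pqPopLE h i).2) := by
      unfold pickStep
      rw [hpop1]
      rfl
    rw [s1]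
    have s2 : pickStep i (1 * -e1.1, [some e1], (pqPopLE h i).2) =
        ((1 * -e1.1) * -e2.1, [some e1, some e2], (pqPopLE (pqPopLE h i).2 i).2) := by
      unfold pickStep
      rw [hpop2]
      rfl
    rw [s2]
    unfold pickStep
    rw [hpop3]
    rfl
  -- the product is the product of the three largest prefix values
  have hvalsperm : ((h.filter (fun p => p.2 ≤ i)).map (fun p => -p.1)).Perm (arr.take (i + 1)) := by
    refine (hperm.map _).trans ?_
    have : (pairsLe arr i).map (fun p => -p.1) = (List.range (i + 1)).map (fun k => arr.getD k 0) := by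
      simp [pairsLe, List.map_map, Function.comp]
    rw [this, take_eq_range_map arr (i + 1) (by omega)]
  have hvpw : ((h.filter (fun p => p.2 ≤ i)).map (fun p => -p.1)).reverse.Pairwise (· ≤ ·) := by
    rw [List.pairwise_reverse]
    exact hFpw.map _ (fun a b hab => by have := lep_fst hab; omega)
  have hsort : sortI (arr.take (i + 1)) = ((h.filter (fun p => p.2 ≤ i)).map (fun p => -p.1)).reverse :=
    sortI_canon ((List.reverse_perm _).trans hvalsperm) hvpw
  have hvlen : ((h.filter (fun p => p.2 ≤ i)).map (fun p => -p.1)).length = i + 1 := by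
    rw [List.length_map, hFlen]
  have hprod : ((1 * -e1.1) * -e2.1) * -e3.1 = prodAt arr (i + 1) := by
    rw [prodAt, hsort, tl3, List.length_reverse, hvlen, List.drop_reverse, hvlen]
    have h3 : (i + 1) - ((i + 1) - 3) = 3 := by omega
    rw [h3, hFeq]
    simp only [List.map_cons, List.take_succ_cons, List.take_zero, List.reverse_cons,
      List.reverse_nil, List.nil_append, List.cons_append, List.prod_cons, List.prod_nil]
    ring
  refine ⟨by rw [hpick]; exact hprod, ?_, ?_⟩
  · rw [hpick]
    exact pushTemp_pairwise i _ _ hCpw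
  · rw [hpick]
    have htemp : ([some e1, some e2, some e3] : List (Option (Int × Nat))) =
        ([e1, e2, e3] : List (Int × Nat)).map some := rfl
    rw [htemp]
    refine ((pushTemp_perm i [e1, e2, e3] _).filter _).trans ?_
    rw [List.filter_append, filter_lt_le i (by omega)]
    have hCQ : (pqPopLE (pqPopLE (pqPopLE h i).2 i).2 i).2.filter (fun p => p.2 ≤ i - 1) =
        rest.filter (fun p => p.2 ≤ i - 1) := by
      rw [← hCfil, filter_le_of_le i (by omega)]
    rw [hCQ]
    have hjoin : ([e1, e2, e3] : List (Int × Nat)).filter (fun p => p.2 ≤ i - 1) ++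
        rest.filter (fun p => p.2 ≤ i - 1) =
        (h.filter (fun p => p.2 ≤ i)).filter (fun p => p.2 ≤ i - 1) := by
      rw [hFeq]
      simp only [List.filter_cons, List.filter_nil]
      split_ifs <;> simp
    rw [hjoin, ← pairsLe_filter arr i (by omega)]
    exact hperm.filter _

def resP (arr : List Int) (w : Nat) : List Int :=
  (List.range arr.length).map (fun j => if w < j then prodAt arr (j + 1) else -1)

lemma resP_set (arr : List Int) (w : Nat) (hw : w + 1 < arr.length) :
    (resP arr (w + 1)).set (w + 1) (prodAt arr (w + 2)) = resP arr w := by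
  apply List.ext_getElem
  · simp [resP]
  · intro n' h1 h2
    simp only [resP, List.getElem_set, List.getElem_map, List.getElem_range]
    by_cases he : w + 1 = n'
    · subst he
      rw [if_pos rfl, if_pos (by omega)]
    · rw [if_neg he]
      by_cases h3 : w < n'
      · rw [if_pos (by omega), if_pos h3]
      · rw [if_neg (by omega), if_neg h3]

lemma loopA_inv (arr : List Int) : ∀ i : Nat, 1 ≤ i → i < arr.length →
    ∀ h : List (Int × Nat), h.Pairwise lep →
    (h.filter (fun p => p.2 ≤ i)).Perm (pairsLe arr i) →
    loopA i (resP arr i) h = finalRes arr := by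
  intro i
  induction i with
  | zero => intro h1; omega
  | succ i ih =>
    intro _ hlt h hp hperm
    cases i with
    | zero =>
      simp only [loopA]
      apply List.map_congr_left
      intro j hj
      unfold outF
      by_cases h2 : 2 ≤ j
      · rw [if_pos (by omega), if_pos h2]
      · rw [if_neg (by omega), if_neg h2]
    | succ j =>
      obtain ⟨hprodEq, hpw', hperm'⟩ := pick3_spec arr (j + 2) h (by omega) hlt hp hperm
      have hstep : loopA (j + 2) (resP arr (j + 2)) h =
          loopA (j + 1) ((resP arr (j + 2)).set (j + 2) (pick3 h (j + 2)).1)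
            (pushTemp (j + 2) (pick3 h (j + 2)).2.1 (pick3 h (j + 2)).2.2) := rfl
      rw [hstep, hprodEq, show (j + 2) = (j + 1) + 1 from rfl,
        resP_set arr (j + 1) (by omega)]
      have hperm'' : ((pushTemp (j + 2) (pick3 h (j + 2)).2.1
          (pick3 h (j + 2)).2.2).filter (fun p => p.2 ≤ j + 1)).Perm (pairsLe arr (j + 1)) := by
        simpa using hperm'
      exact ih (by omega) (by omega) _ hpw' hperm''

lemma a_eq_finalRes (arr : List Int) : findMaxProductBackward arr = finalRes arr := by
  by_cases hnil : arr = []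
  · subst hnil
    simp [findMaxProductBackward, finalRes]
  · rw [findMaxProductBackward, if_neg hnil]
    have hn : 1 ≤ arr.length := List.length_pos_iff.mpr hnil
    have hrepl : List.replicate arr.length (-1 : Int) = resP arr (arr.length - 1) := by
      apply List.ext_getElem
      · simp [resP]
      · intro n' h1 h2
        simp only [resP, List.getElem_replicate, List.getElem_map, List.getElem_range]
        have hlen : n' < arr.length := by
          simpa [resP] using h2
        rw [if_neg (by omega)]
    have hpw0 : (buildHeap arr 0 []).Pairwise lep := buildHeap_pairwise arr 0 [] (by simp)
    have hperm0 : ((buildHeap arr 0 []).filter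
        (fun p => p.2 ≤ arr.length - 1)).Perm (pairsLe arr (arr.length - 1)) := by
      have h1 := buildHeap_perm arr 0 []
      rw [List.nil_append] at h1
      have h2 : pairsFrom arr 0 = pairsLe arr (arr.length - 1) := by
        rw [pairsFrom_eq]
        simp only [pairsLe]
        rw [show arr.length - 1 + 1 = arr.length by omega]
        apply List.map_congr_left
        intro k hk
        simp
      refine (h1.filter _).trans ?_
      rw [h2]
      rw [List.filter_eq_self.mpr ?_]
      intro a ha
      simp only [pairsLe, List.mem_map, List.mem_range] at ha
      obtain ⟨k, hk, rfl⟩ := ha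
      simp
      omega
    by_cases h2 : 2 ≤ arr.length
    · rw [hrepl]
      exact loopA_inv arr (arr.length - 1) (by omega) (by omega) _ hpw0 hperm0
    · have hn1 : arr.length = 1 := by omega
      rw [hn1]
      simp [loopA, finalRes, outF, hn1]

-- ===== VERDICT (by name: the statement is the Claim_ definition above) =====
theorem findMaxProductBackward_spec : Claim_equal_findMaxProductBackward := by
  intro arr _
  unfold Spec_findMaxProductBackward
  rw [a_eq_finalRes, alt_eq_finalRes]
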